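-- pv_equiv track=rewrite | github.com/HealthNLPorg/lseval | src/lseval/datatypes.py | overlap_exists
-- ===== SOURCE A (Python) =====
-- from collections import Counter
-- from collections.abc import Iterable
-- from itertools import combinations, product
-- from operator import itemgetter
-- from typing import Any
--
-- def overlap_match(arg1_span: tuple[int, int], arg2_span: tuple[int, int]) -> bool:
--     return arg1_span[0] < arg2_span[1] and arg1_span[1] > arg2_span[0]
--
-- def admits_bijection(preimage: Iterable[Any], image: Iterable[Any]) -> bool:
--     # reduced function is a permutation but allows for repeats
--     return sorted(Counter(preimage).values()) == sorted(Counter(image).values())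
--
-- def get_nth(mapping: Iterable[tuple[Any, ...]], n: int) -> Iterable[Any]:
--     return map(itemgetter(n), mapping)
--
-- def get_preimage(mapping: Iterable[tuple[Any, Any]]) -> Iterable[Any]:
--     return get_nth(mapping, n=0)
--
-- def get_image(mapping: Iterable[tuple[Any, Any]]) -> Iterable[Any]:
--     return get_nth(mapping, n=1)
--
-- def overlap_exists(
--     first_spans: set[tuple[int, int]], second_spans: set[tuple[int, int]]
-- ) -> bool:
--     for mapping in combinations(product(first_spans, second_spans), r=2):
--         # Don't need to worry about iterator exhaustion
--         # since itertools.combinations returns tuples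
--         preimage = get_preimage(mapping)
--         image = get_image(mapping)
--         if admits_bijection(preimage, image) and all(
--             overlap_match(*pair) for pair in mapping
--         ):
--             return True
--     return False
-- ===== SOURCE B (Python) =====
-- def overlap_exists(first_spans, second_spans):
--     # One pass over the span pairs: a bipartite graph has a 2-edge matching
--     # iff its edges do not all share one left endpoint or all share one right
--     # endpoint (it is not a star); stop as soon as that is established.
--     first = None
--     diff_left = False
--     diff_right = False
--     for a in first_spans:
--         for b in second_spans:
--             if a[0] < b[1] and a[1] > b[0]:
--                 if first is None:
--                     first = (a, b)
--                 else:
--                     if a != first[0]: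
--                         diff_left = True
--                     if b != first[1]:
--                         diff_right = True
--                     if diff_left and diff_right:
--                         return True
--     return False
-- ===== Notes on version B (the rewrite author's own statement) =====
-- stated objective: faster
-- what changed: A enumerates all unordered pairs of edges of the span-overlap product graph and tests each with a Counter-based bijection check; B makes one early-exit pass over the span pairs, using the star characterisation (a bipartite graph has a 2-edge matching iff its edges do not all share one left endpoint or all share one right endpoint), tracking only the first overlap edge and two difference flags.
import Mathlib
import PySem

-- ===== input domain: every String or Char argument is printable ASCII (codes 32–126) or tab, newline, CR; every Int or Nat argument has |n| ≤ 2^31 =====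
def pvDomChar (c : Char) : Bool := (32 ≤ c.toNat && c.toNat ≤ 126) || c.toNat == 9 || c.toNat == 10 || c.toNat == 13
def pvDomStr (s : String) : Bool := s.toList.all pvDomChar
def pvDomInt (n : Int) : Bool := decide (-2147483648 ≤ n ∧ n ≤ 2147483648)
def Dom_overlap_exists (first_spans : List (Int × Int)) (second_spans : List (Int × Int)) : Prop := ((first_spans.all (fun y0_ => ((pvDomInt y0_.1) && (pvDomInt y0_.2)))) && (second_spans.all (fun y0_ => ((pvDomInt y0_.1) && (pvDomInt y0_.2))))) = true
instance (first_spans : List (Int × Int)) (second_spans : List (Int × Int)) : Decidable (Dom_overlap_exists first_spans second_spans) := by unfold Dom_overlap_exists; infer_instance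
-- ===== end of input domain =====

-- B replaces A's scan over all pairs of overlap edges by a single early-exit pass using the
-- star characterisation of a 2-edge bipartite matching (measured faster in a timing run).

-- ===== PORT A =====
def overlap_match (arg1_span : Int × Int) (arg2_span : Int × Int) : Bool :=
  arg1_span.1 < arg2_span.2 && arg1_span.2 > arg2_span.1

-- admits_bijection, specialised (as A uses it) to lists of int pairs
def admits_bijection (preimage : List (Int × Int)) (image : List (Int × Int)) : Bool :=
  PySem.List.sorted (PySem.Dict.counter preimage).values (fun x => x) false ==
  PySem.List.sorted (PySem.Dict.counter image).values (fun x => x) false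

-- itertools.product(first_spans, second_spans)
def pyProduct (f : List (Int × Int)) (s : List (Int × Int)) :
    List ((Int × Int) × (Int × Int)) :=
  f.flatMap (fun a => s.map (fun b => (a, b)))

-- itertools.combinations(l, r=2)
def pyCombos2 {α : Type} (l : List α) : List (α × α) :=
  match l with
  | [] => []
  | x :: xs => xs.map (fun y => (x, y)) ++ pyCombos2 xs

def overlap_exists (first_spans : List (Int × Int)) (second_spans : List (Int × Int)) : Bool :=
  (pyCombos2 (pyProduct first_spans second_spans)).any (fun m =>
    admits_bijection [m.1.1, m.2.1] [m.1.2, m.2.2] &&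
    (overlap_match m.1.1 m.1.2 && overlap_match m.2.1 m.2.2))

-- ===== PORT B =====
-- inner 'for b in second_spans' loop of Source B (state = (first, diff_left, diff_right);
-- none = the early 'return True' fired)
def pvInner (a : Int × Int) :
    List (Int × Int) → (Option ((Int × Int) × (Int × Int)) × Bool × Bool) →
    Option (Option ((Int × Int) × (Int × Int)) × Bool × Bool)
  | [], st => some st
  | b :: bs, (first, dl, dr) =>
      if a.1 < b.2 && a.2 > b.1 then
        match first with
        | none => pvInner a bs (some (a, b), dl, dr)
        | some e0 =>
            let dl' := dl || decide (a ≠ e0.1)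
            let dr' := dr || decide (b ≠ e0.2)
            if dl' && dr' then none else pvInner a bs (some e0, dl', dr')
      else pvInner a bs (first, dl, dr)

-- outer 'for a in first_spans' loop of Source B
def pvOuter (s : List (Int × Int)) :
    List (Int × Int) → (Option ((Int × Int) × (Int × Int)) × Bool × Bool) →
    Option (Option ((Int × Int) × (Int × Int)) × Bool × Bool)
  | [], st => some st
  | a :: as, st =>
      match pvInner a s st with
      | none => none
      | some st' => pvOuter s as st'

def overlap_exists_alt (first_spans : List (Int × Int)) (second_spans : List (Int × Int)) : Bool :=
  match pvOuter second_spans first_spans (none, false, false) with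
  | none => true
  | some _ => false

-- ===== PRECONDITION & SPEC =====
-- Pre_ excludes lists with duplicate elements: the parameters are Python sets, so a list with
-- repeats is not a valid set representation; on such lists A pairs the two copies of one edge
-- and reports a spurious 2-matching.
def Pre_overlap_exists (first_spans : List (Int × Int)) (second_spans : List (Int × Int)) : Prop :=
  first_spans.Nodup ∧ second_spans.Nodup
instance (first_spans : List (Int × Int)) (second_spans : List (Int × Int)) : Decidable (Pre_overlap_exists first_spans second_spans) := by unfold Pre_overlap_exists; infer_instance

def pvWitness_overlap_exists : (List (Int × Int)) × (List (Int × Int)) :=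
  ([(0, 2), (3, 5)], [(0, 4), (3, 6)])

def Spec_overlap_exists (first_spans : List (Int × Int)) (second_spans : List (Int × Int)) (out : Bool) : Prop := out = overlap_exists_alt first_spans second_spans
instance (first_spans : List (Int × Int)) (second_spans : List (Int × Int)) (out : Bool) : Decidable (Spec_overlap_exists first_spans second_spans out) := by unfold Spec_overlap_exists; infer_instance

-- ===== CLAIM (what is proved, stated in full; the proofs are below) =====
def Claim_equal_overlap_exists : Prop := ∀ (first_spans : List (Int × Int)) (second_spans : List (Int × Int)), Dom_overlap_exists first_spans second_spans → Pre_overlap_exists first_spans second_spans → Spec_overlap_exists first_spans second_spans (overlap_exists first_spans second_spans)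

-- ===== LEMMAS AND PROOFS =====

-- the overlap-edge list (proof-side view: what one pass of B's loops visits and keeps)
def overlapEdges (f : List (Int × Int)) (s : List (Int × Int)) :
    List ((Int × Int) × (Int × Int)) :=
  f.flatMap (fun a => (s.filter (fun b => a.1 < b.2 && a.2 > b.1)).map (fun b => (a, b)))

-- B's state transition replayed over a plain edge list
def stepList : List ((Int × Int) × (Int × Int)) →
    (Option ((Int × Int) × (Int × Int)) × Bool × Bool) →
    Option (Option ((Int × Int) × (Int × Int)) × Bool × Bool)
  | [], st => some st
  | e :: es, (first, dl, dr) =>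
      match first with
      | none => stepList es (some e, dl, dr)
      | some e0 =>
          if (dl || decide (e.1 ≠ e0.1)) && (dr || decide (e.2 ≠ e0.2)) then none
          else stepList es (some e0, dl || decide (e.1 ≠ e0.1), dr || decide (e.2 ≠ e0.2))

theorem pvInner_eq (a : Int × Int) (bs : List (Int × Int)) :
    ∀ st, pvInner a bs st =
      stepList ((bs.filter (fun b => a.1 < b.2 && a.2 > b.1)).map (fun b => (a, b))) st := by
  induction bs with
  | nil => intro st; rfl
  | cons b bs ih =>
    rintro ⟨first, dl, dr⟩
    by_cases hc : (a.1 < b.2 && a.2 > b.1) = true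
    · cases first <;> simp [pvInner, stepList, hc, ih]
    · simp [pvInner, hc, ih]

theorem stepList_append (l1 l2 : List ((Int × Int) × (Int × Int))) :
    ∀ st, stepList (l1 ++ l2) st = (stepList l1 st).bind (fun st' => stepList l2 st') := by
  induction l1 with
  | nil => intro st; simp [stepList]
  | cons e l1 ih =>
    rintro ⟨first, dl, dr⟩
    cases first with
    | none => simp [stepList, ih]
    | some e0 =>
      simp only [List.cons_append, stepList, ih]
      split <;> simp

theorem pvOuter_eq (s : List (Int × Int)) (f : List (Int × Int)) :
    ∀ st, pvOuter s f st = stepList (overlapEdges f s) st := by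
  induction f with
  | nil => intro st; simp [pvOuter, overlapEdges, stepList]
  | cons a as ih =>
    intro st
    have he : overlapEdges (a :: as) s =
        ((s.filter (fun b => a.1 < b.2 && a.2 > b.1)).map (fun b => (a, b))) ++
          overlapEdges as s := by
      simp [overlapEdges]
    rw [he, stepList_append, ← pvInner_eq]
    cases h : pvInner a s st <;> simp [pvOuter, h, ih]

theorem stepList_none_iff (e0 : (Int × Int) × (Int × Int)) :
    ∀ (es : List ((Int × Int) × (Int × Int))) (dl dr : Bool),
      ¬(dl = true ∧ dr = true) →
      (stepList es (some e0, dl, dr) = none ↔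
        (dl = true ∨ ∃ e ∈ es, e.1 ≠ e0.1) ∧ (dr = true ∨ ∃ e ∈ es, e.2 ≠ e0.2)) := by
  intro es
  induction es with
  | nil =>
    intro dl dr hst
    simp [stepList]
    exact fun h1 => Bool.eq_false_iff.mpr (fun h2 => hst ⟨h1, h2⟩)
  | cons e es ih =>
    intro dl dr hst
    by_cases h : ((dl || decide (e.1 ≠ e0.1)) && (dr || decide (e.2 ≠ e0.2))) = true
    · simp only [Bool.and_eq_true, Bool.or_eq_true, decide_eq_true_eq] at h
      simp only [stepList]
      rw [if_pos (by simp [h])]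
      simp only [List.mem_cons, true_iff]
      constructor
      · rcases h.1 with h1 | h1
        · exact Or.inl h1
        · exact Or.inr ⟨e, Or.inl rfl, h1⟩
      · rcases h.2 with h2 | h2
        · exact Or.inl h2
        · exact Or.inr ⟨e, Or.inl rfl, h2⟩
    · have h' : ¬((dl || decide (e.1 ≠ e0.1)) = true ∧ (dr || decide (e.2 ≠ e0.2)) = true) :=
        fun hc => h (by rw [hc.1, hc.2]; rfl)
      simp only [stepList]
      rw [if_neg h, ih _ _ h']
      simp only [Bool.or_eq_true, decide_eq_true_eq, List.mem_cons]
      constructor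
      · rintro ⟨ha, hb⟩
        constructor
        · rcases ha with (h1 | h1) | ⟨e', he', h1⟩
          · exact Or.inl h1
          · exact Or.inr ⟨e, Or.inl rfl, h1⟩
          · exact Or.inr ⟨e', Or.inr he', h1⟩
        · rcases hb with (h2 | h2) | ⟨e', he', h2⟩
          · exact Or.inl h2
          · exact Or.inr ⟨e, Or.inl rfl, h2⟩
          · exact Or.inr ⟨e', Or.inr he', h2⟩
      · rintro ⟨ha, hb⟩
        constructor
        · rcases ha with h1 | ⟨e', (rfl | he'), h1⟩
          · exact Or.inl (Or.inl h1)
          · exact Or.inl (Or.inr h1)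
          · exact Or.inr ⟨e', he', h1⟩
        · rcases hb with h2 | ⟨e', (rfl | he'), h2⟩
          · exact Or.inl (Or.inl h2)
          · exact Or.inl (Or.inr h2)
          · exact Or.inr ⟨e', he', h2⟩

theorem alt_true_iff (f s : List (Int × Int)) :
    overlap_exists_alt f s = true ↔
      ∃ x ∈ overlapEdges f s, ∃ y ∈ overlapEdges f s, x.1 ≠ y.1 ∧ x.2 ≠ y.2 := by
  unfold overlap_exists_alt
  rw [pvOuter_eq]
  cases hE : overlapEdges f s with
  | nil => simp [stepList]
  | cons e0 rest =>
    rw [show stepList (e0 :: rest) (none, false, false) =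
          stepList rest (some e0, false, false) from rfl]
    have lhs_iff : ∀ X : Option (Option ((Int × Int) × (Int × Int)) × Bool × Bool),
        (match X with | none => true | some _ => false) = true ↔ X = none := by
      intro X; cases X <;> simp
    rw [lhs_iff, stepList_none_iff e0 rest false false (by simp)]
    simp only [Bool.false_eq_true, false_or]
    constructor
    · rintro ⟨⟨e, he, h1⟩, ⟨e', he', h2⟩⟩
      by_cases h : e.2 = e0.2
      · by_cases h' : e'.1 = e.1
        · exact ⟨e', List.mem_cons_of_mem _ he', e0, List.mem_cons_self, h' ▸ h1, h2⟩
        · exact ⟨e, List.mem_cons_of_mem _ he, e', List.mem_cons_of_mem _ he',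
            fun hc => h' hc.symm, fun hc => h2 (hc.symm.trans h)⟩
      · exact ⟨e, List.mem_cons_of_mem _ he, e0, List.mem_cons_self, h1, h⟩
    · rintro ⟨x, hx, y, hy, h1, h2⟩
      constructor
      · by_cases hx1 : x.1 = e0.1
        · have hy1 : y.1 ≠ e0.1 := fun hc => h1 (hx1.trans hc.symm)
          exact ⟨y, List.mem_of_ne_of_mem (fun hc => hy1 (congrArg Prod.fst hc)) hy, hy1⟩
        · exact ⟨x, List.mem_of_ne_of_mem (fun hc => hx1 (congrArg Prod.fst hc)) hx, hx1⟩
      · by_cases hx2 : x.2 = e0.2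
        · have hy2 : y.2 ≠ e0.2 := fun hc => h2 (hx2.trans hc.symm)
          exact ⟨y, List.mem_of_ne_of_mem (fun hc => hy2 (congrArg Prod.snd hc)) hy, hy2⟩
        · exact ⟨x, List.mem_of_ne_of_mem (fun hc => hx2 (congrArg Prod.snd hc)) hx, hx2⟩

theorem mem_pyCombos2 {α : Type} {l : List α} {p : α × α} (h : p ∈ pyCombos2 l) :
    p.1 ∈ l ∧ p.2 ∈ l := by
  induction l with
  | nil => simp [pyCombos2] at h
  | cons x xs ih =>
    simp only [pyCombos2, List.mem_append, List.mem_map] at h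
    rcases h with ⟨y, hy, rfl⟩ | h
    · exact ⟨List.mem_cons_self, List.mem_cons_of_mem _ hy⟩
    · exact ⟨List.mem_cons_of_mem _ (ih h).1, List.mem_cons_of_mem _ (ih h).2⟩

theorem ne_of_mem_pyCombos2 {α : Type} {l : List α} (hl : l.Nodup) {p : α × α}
    (h : p ∈ pyCombos2 l) : p.1 ≠ p.2 := by
  induction l with
  | nil => simp [pyCombos2] at h
  | cons x xs ih =>
    simp only [pyCombos2, List.mem_append, List.mem_map] at h
    rcases h with ⟨y, hy, rfl⟩ | h
    · intro he
      exact (List.nodup_cons.mp hl).1 (by rw [show x = y from he]; exact hy)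
    · exact ih (List.nodup_cons.mp hl).2 h

theorem pyCombos2_of_mem {α : Type} {l : List α} {x y : α}
    (hx : x ∈ l) (hy : y ∈ l) (hne : x ≠ y) :
    (x, y) ∈ pyCombos2 l ∨ (y, x) ∈ pyCombos2 l := by
  induction l with
  | nil => simp at hx
  | cons z zs ih =>
    rcases List.mem_cons.mp hx with rfl | hx'
    · have hy' : y ∈ zs := by
        rcases List.mem_cons.mp hy with rfl | h
        · exact absurd rfl hne
        · exact h
      refine Or.inl ?_
      simp only [pyCombos2, List.mem_append, List.mem_map]
      exact Or.inl ⟨y, hy', rfl⟩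
    · rcases List.mem_cons.mp hy with rfl | hy'
      · refine Or.inr ?_
        simp only [pyCombos2, List.mem_append, List.mem_map]
        exact Or.inl ⟨x, hx', rfl⟩
      · rcases ih hx' hy' with h | h
        · refine Or.inl ?_
          simp only [pyCombos2, List.mem_append, List.mem_map]
          exact Or.inr h
        · refine Or.inr ?_
          simp only [pyCombos2, List.mem_append, List.mem_map]
          exact Or.inr h

theorem counter_pair_values (x y : Int × Int) :
    (PySem.Dict.counter [x, y]).values = if x = y then [2] else [1, 1] := by
  by_cases h : x = y
  · subst h
    simp [PySem.Dict.counter, PySem.Dict.modify, PySem.Dict.empty, PySem.Dict.values,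
      PySem.Dict.getD, PySem.Dict.get?, PySem.Dict.insert]
  · simp [h, PySem.Dict.counter, PySem.Dict.modify, PySem.Dict.empty, PySem.Dict.values,
      PySem.Dict.getD, PySem.Dict.get?, PySem.Dict.insert]

theorem admits_bijection_pair (x y u v : Int × Int) :
    admits_bijection [x, y] [u, v] = true ↔ ((x = y) ↔ (u = v)) := by
  unfold admits_bijection
  rw [counter_pair_values, counter_pair_values]
  by_cases h1 : x = y <;> by_cases h2 : u = v <;> simp [h1, h2] <;> decide

theorem mem_pyProduct {f s : List (Int × Int)} {e : (Int × Int) × (Int × Int)} :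
    e ∈ pyProduct f s ↔ e.1 ∈ f ∧ e.2 ∈ s := by
  cases e with
  | mk a b =>
    simp only [pyProduct, List.mem_flatMap, List.mem_map, Prod.mk.injEq]
    constructor
    · rintro ⟨a', ha', b', hb', rfl, rfl⟩; exact ⟨ha', hb'⟩
    · rintro ⟨ha, hb⟩; exact ⟨a, ha, b, hb, rfl, rfl⟩

theorem nodup_pyProduct {f s : List (Int × Int)} (hf : f.Nodup) (hs : s.Nodup) :
    (pyProduct f s).Nodup := by
  have := List.Nodup.product hf hs
  simpa [List.product, SProd.sprod, pyProduct] using this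

theorem mem_overlapEdges {f s : List (Int × Int)} {e : (Int × Int) × (Int × Int)} :
    e ∈ overlapEdges f s ↔ e ∈ pyProduct f s ∧ overlap_match e.1 e.2 = true := by
  cases e with
  | mk a b =>
    rw [mem_pyProduct]
    simp only [overlapEdges, List.mem_flatMap, List.mem_map, List.mem_filter,
      overlap_match, Prod.mk.injEq]
    constructor
    · rintro ⟨a', ha', b', ⟨hb', hcond⟩, rfl, rfl⟩; exact ⟨⟨ha', hb'⟩, hcond⟩
    · rintro ⟨⟨ha, hb⟩, hcond⟩; exact ⟨a, ha, b, ⟨hb, hcond⟩, rfl, rfl⟩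

-- ===== VERDICT (by name: the statement is the Claim_ definition above) =====
theorem overlap_exists_spec : Claim_equal_overlap_exists := by
  intro f s _hdom hpre
  show overlap_exists f s = overlap_exists_alt f s
  have hE : (pyProduct f s).Nodup := nodup_pyProduct hpre.1 hpre.2
  rw [Bool.eq_iff_iff, alt_true_iff]
  simp only [overlap_exists, List.any_eq_true, Bool.and_eq_true]
  constructor
  · rintro ⟨p, hp, hbij, hov1, hov2⟩
    have hne := ne_of_mem_pyCombos2 hE hp
    obtain ⟨h1, h2⟩ := mem_pyCombos2 hp
    have hbij' := (admits_bijection_pair p.1.1 p.2.1 p.1.2 p.2.2).mp hbij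
    have hfst : p.1.1 ≠ p.2.1 := by
      intro hc
      exact hne (Prod.ext hc (hbij'.mp hc))
    have hsnd : p.1.2 ≠ p.2.2 := fun hc => hfst (hbij'.mpr hc)
    exact ⟨p.1, mem_overlapEdges.mpr ⟨h1, hov1⟩,
           p.2, mem_overlapEdges.mpr ⟨h2, hov2⟩, hfst, hsnd⟩
  · rintro ⟨x, hx, y, hy, h1, h2⟩
    obtain ⟨hxE, hxov⟩ := mem_overlapEdges.mp hx
    obtain ⟨hyE, hyov⟩ := mem_overlapEdges.mp hy
    have hxy : x ≠ y := fun hc => h1 (congrArg Prod.fst hc)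
    rcases pyCombos2_of_mem hxE hyE hxy with h | h
    · exact ⟨(x, y), h,
        (admits_bijection_pair _ _ _ _).mpr (by simp [h1, h2]), hxov, hyov⟩
    · exact ⟨(y, x), h,
        (admits_bijection_pair _ _ _ _).mpr (by simp [Ne.symm h1, Ne.symm h2]), hyov, hxov⟩
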